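-- pv_equiv track=rewrite | github.com/diakymenko/coursera_python | Week4/Berlin_clock.py | str_r_minutes_11
-- ===== SOURCE A (Python) =====
-- def str_r_minutes_11(number):
--     str = ""
--     for i in range(number):
--         if (i + 1) % 3 == 0:
--             str = str + "R"
--         else:
--             str = str + "Y"
--     for i in range(11 - number):
--         str = str + "O"
--     return str
-- ===== SOURCE B (Python) =====
-- def str_r_minutes_11(number):
--     return ("YYR" * (number // 3 + 1))[:number] + "O" * (11 - number)
-- ===== Notes on version B (the rewrite author's own statement) =====
-- stated objective: faster
-- what changed: Replaces the two character-by-character string-append loops with a closed-form construction: repeat the period-3 pattern 'YYR' once, slice to length, and concatenate the 'O' padding.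
import Mathlib
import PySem

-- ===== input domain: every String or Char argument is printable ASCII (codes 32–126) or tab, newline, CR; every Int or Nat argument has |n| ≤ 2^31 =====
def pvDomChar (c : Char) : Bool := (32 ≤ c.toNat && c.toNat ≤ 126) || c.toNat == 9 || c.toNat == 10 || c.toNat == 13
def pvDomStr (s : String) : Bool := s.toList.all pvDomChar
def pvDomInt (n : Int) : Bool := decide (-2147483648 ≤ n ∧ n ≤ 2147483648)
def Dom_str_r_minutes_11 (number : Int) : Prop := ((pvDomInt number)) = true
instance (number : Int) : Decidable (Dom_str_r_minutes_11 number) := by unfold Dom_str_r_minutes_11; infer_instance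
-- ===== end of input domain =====

-- B builds the row closed-form (repeat 'YYR', slice, pad with 'O') instead of A's two append loops; objective: idiomatic.

-- ===== PORT A =====
def str_r_minutes_11 (number : Int) : String :=
  let s1 : List Char :=
    (PySem.List.pyRange 0 number 1).foldl
      (fun s i => s ++ (if PySem.Int.mod (i + 1) 3 = 0 then ['R'] else ['Y'])) []
  let s2 : List Char :=
    (PySem.List.pyRange 0 (11 - number) 1).foldl (fun s _ => s ++ ['O']) s1
  String.ofList s2

-- ===== PORT B =====
def str_r_minutes_11_alt (number : Int) : String :=
  let rep : List Char :=
    (List.replicate (PySem.Int.floordiv number 3 + 1).toNat (['Y', 'Y', 'R'] : List Char)).flatten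
  String.ofList (PySem.List.slice rep none (some number) ++ List.replicate (11 - number).toNat 'O')

-- ===== PRECONDITION & SPEC =====
def Spec_str_r_minutes_11 (number : Int) (out : String) : Prop := out = str_r_minutes_11_alt number
instance (number : Int) (out : String) : Decidable (Spec_str_r_minutes_11 number out) := by unfold Spec_str_r_minutes_11; infer_instance

-- ===== CLAIM (what is proved, stated in full; the proofs are below) =====
def Claim_equal_str_r_minutes_11 : Prop := ∀ (number : Int), Dom_str_r_minutes_11 number → Spec_str_r_minutes_11 number (str_r_minutes_11 number)

-- ===== LEMMAS AND PROOFS =====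

-- the 'O' loop appends one 'O' per element
lemma foldl_O (L : List Int) (init : List Char) :
    L.foldl (fun s _ => s ++ ['O']) init = init ++ List.replicate L.length 'O' := by
  induction L generalizing init with
  | nil => simp
  | cons x xs ih =>
    rw [List.foldl_cons, ih, List.append_assoc]
    simp [List.replicate_succ]

-- A's first loop as an explicit map over range
lemma loopA (m : Nat) :
    (PySem.List.pyRange 0 (m : Int) 1).foldl
      (fun s i => s ++ (if PySem.Int.mod (i + 1) 3 = 0 then ['R'] else ['Y'])) ([] : List Char)
    = (List.range m).map (fun i => if (i + 1) % 3 = 0 then 'R' else 'Y') := by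
  induction m with
  | zero => simp [PySem.List.pyRange_one_eq_nil]
  | succ m ih =>
    have h : ((m : Int) + 1) = ((m + 1 : Nat) : Int) := by push_cast; ring
    rw [show ((m + 1 : Nat) : Int) = (m : Int) + 1 by push_cast; ring,
        PySem.List.pyRange_one_succ_right (by positivity),
        List.foldl_append, ih, List.range_succ, List.map_append]
    simp only [List.foldl_cons, List.foldl_nil, List.map_cons, List.map_nil]
    congr 1
    have hm : PySem.Int.mod ((m : Int) + 1) 3 = (((m + 1) % 3 : Nat) : Int) := by
      exact_mod_cast PySem.Int.mod_natCast (m + 1) 3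
    rw [hm]
    by_cases hc : (m + 1) % 3 = 0 <;> simp [hc] <;> omega

-- element of the repeated 'YYR' pattern
lemma patt_get (j i : Nat) (h : i < 3 * j) :
    ((List.replicate j (['Y', 'Y', 'R'] : List Char)).flatten)[i]'(by
      simpa [List.length_flatten, Nat.mul_comm] using h)
    = if (i + 1) % 3 = 0 then 'R' else 'Y' := by
  induction j generalizing i with
  | zero => omega
  | succ j ih =>
    simp only [List.replicate_succ, List.flatten_cons]
    by_cases hi : i < 3
    · interval_cases i <;> simp
    · obtain ⟨k, rfl⟩ : ∃ k, i = k + 3 := ⟨i - 3, by omega⟩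
      rw [List.getElem_append_right (by simpa using hi)]
      have hk := ih k (by omega)
      rw [show (k + 3 + 1) % 3 = (k + 1) % 3 by omega]
      simp only [List.length_cons, List.length_nil] at hk ⊢
      exact hk

-- the map-over-range form equals take of the repeated pattern
lemma map_eq_take (n : Nat) :
    (List.range n).map (fun i => if (i + 1) % 3 = 0 then 'R' else 'Y')
    = ((List.replicate (n / 3 + 1) (['Y', 'Y', 'R'] : List Char)).flatten).take n := by
  have hlen : ((List.replicate (n / 3 + 1) (['Y', 'Y', 'R'] : List Char)).flatten).length
      = 3 * (n / 3 + 1) := by simp [List.length_flatten, Nat.mul_comm]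
  have hn : n < 3 * (n / 3 + 1) := by omega
  apply List.ext_getElem
  · simp [hlen]; omega
  · intro i h1 h2
    simp only [List.getElem_map, List.getElem_range, List.getElem_take]
    rw [patt_get (n / 3 + 1) i (by simp at h1; omega)]

-- ===== VERDICT (by name: the statement is the Claim_ definition above) =====
theorem str_r_minutes_11_spec : Claim_equal_str_r_minutes_11 := by
  intro number _
  unfold Spec_str_r_minutes_11 str_r_minutes_11 str_r_minutes_11_alt
  simp only
  rw [foldl_O, PySem.List.length_pyRange_one,
      show (11 : Int) - number - 0 = 11 - number by ring]
  congr 1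
  by_cases hneg : number < 0
  · -- negative: both rows are empty
    rw [PySem.List.pyRange_one_eq_nil (by omega), List.foldl_nil]
    have hk : PySem.Int.floordiv number 3 + 1 ≤ 0 := by
      have := (PySem.Int.floordiv_lt_iff_lt_mul (a := number) (b := 3) (q := 0) (by norm_num)).2
        (by omega)
      omega
    rw [show (PySem.Int.floordiv number 3 + 1).toNat = 0 by omega]
    simp [PySem.List.slice]
  · -- number = n ≥ 0
    obtain ⟨n, rfl⟩ : ∃ n : Nat, number = (n : Int) :=
      ⟨number.toNat, by omega⟩
    rw [loopA, PySem.List.slice_to _ (by positivity)]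
    have hfd : PySem.Int.floordiv (n : Int) 3 = ((n / 3 : Nat) : Int) := by
      exact_mod_cast PySem.Int.floordiv_natCast n 3
    rw [hfd, show (((n / 3 : Nat) : Int) + 1).toNat = n / 3 + 1 by omega,
        show ((n : Int)).toNat = n by omega]
    rw [map_eq_take n]
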